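-- pv_equiv track=rewrite | github.com/BlueSkyXN/XTF | core/converter.py | _generate_option_colors
-- ===== SOURCE A (Python) =====
-- from typing import Any, Dict, List, Optional, TypedDict
--
-- def _generate_option_colors(options: List[str]) -> List[str]:
--     """
--     为下拉列表选项生成颜色
--
--     Args:
--         options: 选项列表
--
--     Returns:
--         颜色列表
--     """
--     # 预定义的颜色集合
--     color_palette = [
--         "#1FB6C1",  # 浅蓝色
--         "#F006C2",  # 玫红色
--         "#FB16C3",  # 粉红色
--         "#FFB6C1",  # 淡粉色
--         "#32CD32",  # 绿色
--         "#FF6347",  # 番茄色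
--         "#9370DB",  # 紫色
--         "#FFD700",  # 金色
--         "#FF8C00",  # 橙色
--         "#20B2AA",  # 青色
--         "#9400D3",  # 深紫色
--         "#FF1493",  # 深粉色
--         "#00CED1",  # 深绿松石色
--         "#FF69B4",  # 热粉色
--         "#8A2BE2",  # 蓝紫色
--     ]
--
--     # 循环使用颜色
--     colors = []
--     for i, option in enumerate(options):
--         colors.append(color_palette[i % len(color_palette)])
--
--     return colors
-- ===== SOURCE B (Python) =====
-- from typing import Any, Dict, List, Optional, TypedDict
--
-- def _generate_option_colors(options: List[str]) -> List[str]: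
--     """Assign cycling palette colors by appending whole palette copies chunk-wise,
--     then closing with a truncated palette prefix — no per-item index/modulo bookkeeping."""
--     color_palette = [
--         "#1FB6C1",
--         "#F006C2",
--         "#FB16C3",
--         "#FFB6C1",
--         "#32CD32",
--         "#FF6347",
--         "#9370DB",
--         "#FFD700",
--         "#FF8C00",
--         "#20B2AA",
--         "#9400D3",
--         "#FF1493",
--         "#00CED1",
--         "#FF69B4",
--         "#8A2BE2",
--     ]
--
--     colors: List[str] = []
--     remaining = len(options)
--     while remaining > len(color_palette):
--         colors += color_palette
--         remaining -= len(color_palette)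
--     colors += color_palette[:remaining]
--     return colors
-- ===== Notes on version B (the rewrite author's own statement) =====
-- stated objective: alternative
-- what changed: Replaces the per-element enumerate loop with index-modulo lookups by a chunk-wise while loop on the remaining count that appends whole palette copies and closes with a truncated palette prefix.
import Mathlib
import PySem

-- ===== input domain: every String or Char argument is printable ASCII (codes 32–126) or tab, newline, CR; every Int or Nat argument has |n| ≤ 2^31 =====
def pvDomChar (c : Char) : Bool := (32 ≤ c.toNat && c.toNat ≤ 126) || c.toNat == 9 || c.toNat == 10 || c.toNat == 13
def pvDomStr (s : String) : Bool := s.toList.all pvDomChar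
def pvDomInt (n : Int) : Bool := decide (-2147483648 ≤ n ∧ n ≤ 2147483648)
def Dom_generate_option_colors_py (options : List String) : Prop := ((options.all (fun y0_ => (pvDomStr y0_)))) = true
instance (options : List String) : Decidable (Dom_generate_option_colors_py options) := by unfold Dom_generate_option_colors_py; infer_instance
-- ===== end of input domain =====

-- B replaces A's enumerate/index-modulo loop by a recursion on the remaining count that emits whole palette copies and ends with a truncated prefix (alternative decomposition, same cost).


-- ===== PORT A =====
-- Literal port: for i, option in enumerate(options): colors.append(color_palette[i % len(color_palette)])
-- (pyGet? is exact for the indexing; .getD "" only discharges the Option — the index i % 15 is always in range, so it never fires)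
def generate_option_colors_py (options : List String) : List String :=
  let color_palette : List String :=
    ["#1FB6C1", "#F006C2", "#FB16C3", "#FFB6C1", "#32CD32", "#FF6347", "#9370DB",
     "#FFD700", "#FF8C00", "#20B2AA", "#9400D3", "#FF1493", "#00CED1", "#FF69B4", "#8A2BE2"]
  (PySem.List.enumerate options).foldl
    (fun colors p =>
      colors ++ [(PySem.List.pyGet? color_palette (PySem.Int.mod p.1 (color_palette.length : Int))).getD ""])
    []

-- ===== PORT B =====
-- Literal port of Source B: the palette constant and the chunk-wise while loop
-- (the while loop over (colors, remaining) becomes the structural recursion pvEmitLoop on remaining;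
--  the slice palette[:remaining] with 0 ≤ remaining ≤ len is List.take — exact here)
def pvPalette : List String :=
  ["#1FB6C1", "#F006C2", "#FB16C3", "#FFB6C1", "#32CD32", "#FF6347", "#9370DB",
   "#FFD700", "#FF8C00", "#20B2AA", "#9400D3", "#FF1493", "#00CED1", "#FF69B4", "#8A2BE2"]

def pvEmitLoop (remaining : Nat) (colors : List String) : List String :=
  if remaining > pvPalette.length then
    pvEmitLoop (remaining - pvPalette.length) (colors ++ pvPalette)
  else colors ++ pvPalette.take remaining
termination_by remaining
decreasing_by
  have h15 : pvPalette.length = 15 := rfl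
  omega

def generate_option_colors_py_alt (options : List String) : List String :=
  pvEmitLoop options.length []

-- ===== PRECONDITION & SPEC =====
def Spec_generate_option_colors_py (options : List String) (out : List String) : Prop := out = generate_option_colors_py_alt options
instance (options : List String) (out : List String) : Decidable (Spec_generate_option_colors_py options out) := by unfold Spec_generate_option_colors_py; infer_instance

-- ===== CLAIM (what is proved, stated in full; the proofs are below) =====
def Claim_equal_generate_option_colors_py : Prop := ∀ (options : List String), Dom_generate_option_colors_py options → Spec_generate_option_colors_py options (generate_option_colors_py options)

-- ===== LEMMAS AND PROOFS =====

-- proof-side helper: the loop's result, written accumulator-free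
def pvEmit (n : Nat) : List String :=
  if n ≤ pvPalette.length then pvPalette.take n
  else pvPalette ++ pvEmit (n - pvPalette.length)
termination_by n
decreasing_by
  have h15 : pvPalette.length = 15 := rfl
  omega

-- the accumulator loop computes colors ++ pvEmit remaining
theorem pv_emitLoop_eq : ∀ (n : Nat) (acc : List String), pvEmitLoop n acc = acc ++ pvEmit n := by
  intro n
  induction n using Nat.strong_induction_on with
  | _ n ih =>
    intro acc
    rw [pvEmitLoop, pvEmit]
    have h15 : pvPalette.length = 15 := rfl
    by_cases h : n ≤ pvPalette.length
    · rw [if_neg (by omega), if_pos h]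
    · rw [if_pos (by omega), if_neg h, ih (n - pvPalette.length) (by omega), List.append_assoc]

-- an index-function applied to the first components of `enumerate`
theorem pv_map_enumerate_fst {α β : Type} (xs : List α) (f : Int → β) :
    ∀ (s : Int), (PySem.List.enumerate xs s).map (fun p => f p.1)
      = (List.range xs.length).map (fun k : Nat => f (s + (k : Int))) := by
  induction xs with
  | nil => intro s; simp [PySem.List.enumerate_nil]
  | cons x xs ih =>
    intro s
    simp only [PySem.List.enumerate_cons, List.map_cons, List.length_cons,
      List.range_succ_eq_map, List.map_map, ih (s + 1)]
    refine congrArg₂ _ (by norm_num) ?_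
    apply List.map_congr_left
    intro k _
    simp only [Function.comp]
    push_cast
    ring_nf

-- a prefix of a list, written as a map over range
theorem pv_take_eq_range_map {α : Type} (L : List α) (d : α) (n : Nat) (hn : n ≤ L.length) :
    L.take n = (List.range n).map (fun i => L.getD i d) := by
  apply List.ext_getElem
  · simp [Nat.min_eq_left hn]
  · intro i h1 h2
    simp only [List.length_take] at h1
    have hi : i < n := lt_of_lt_of_le h1 (min_le_left _ _)
    have hiL : i < L.length := lt_of_lt_of_le hi hn
    simp [List.getElem_take, List.getD_eq_getElem?_getD, List.getElem?_eq_getElem hiL,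
      List.getElem_range, List.getElem_map]

-- pvEmit computes the cyclic-lookup list
theorem pv_emit_eq_range_map :
    ∀ (n : Nat), pvEmit n = (List.range n).map (fun i => pvPalette.getD (i % pvPalette.length) "") := by
  intro n
  induction n using Nat.strong_induction_on with
  | _ n ih =>
    rw [pvEmit]
    by_cases h : n ≤ pvPalette.length
    · rw [if_pos h, pv_take_eq_range_map pvPalette "" n h]
      apply List.map_congr_left
      intro i hi
      have : i < pvPalette.length := lt_of_lt_of_le (List.mem_range.mp hi) h
      rw [Nat.mod_eq_of_lt this]
    · have h15 : pvPalette.length = 15 := rfl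
      rw [if_neg h, ih (n - pvPalette.length) (by omega)]
      have hr : (List.range n).map (fun i => pvPalette.getD (i % pvPalette.length) "")
          = (List.range pvPalette.length).map (fun i => pvPalette.getD (i % pvPalette.length) "")
            ++ (List.range (n - pvPalette.length)).map
                (fun j => pvPalette.getD ((pvPalette.length + j) % pvPalette.length) "") := by
        conv_lhs => rw [show n = pvPalette.length + (n - pvPalette.length) by omega]
        rw [List.range_add, List.map_append, List.map_map]
        rfl
      rw [hr]
      refine congrArg₂ (· ++ ·) ?_ ?_
      · conv_lhs => rw [← List.take_length (l := pvPalette),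
          pv_take_eq_range_map pvPalette "" pvPalette.length le_rfl]
        apply List.map_congr_left
        intro i hi
        rw [Nat.mod_eq_of_lt (List.mem_range.mp hi)]
      · apply List.map_congr_left
        intro j _
        rw [Nat.add_mod_left]

-- ===== VERDICT (by name: the statement is the Claim_ definition above) =====
theorem generate_option_colors_py_spec : Claim_equal_generate_option_colors_py := by
  intro options _
  unfold Spec_generate_option_colors_py generate_option_colors_py generate_option_colors_py_alt
  have hpal : (["#1FB6C1", "#F006C2", "#FB16C3", "#FFB6C1", "#32CD32", "#FF6347", "#9370DB",
     "#FFD700", "#FF8C00", "#20B2AA", "#9400D3", "#FF1493", "#00CED1", "#FF69B4", "#8A2BE2"] : List String)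
      = pvPalette := rfl
  simp only [hpal]
  rw [PySem.List.foldl_append_singleton_eq_map, List.nil_append,
    pv_map_enumerate_fst options
      (fun i => (PySem.List.pyGet? pvPalette (PySem.Int.mod i (pvPalette.length : Int))).getD "") 0,
    pv_emitLoop_eq, List.nil_append, pv_emit_eq_range_map]
  apply List.map_congr_left
  intro k _
  have hk : (0 : Int) + (k : Int) = ((k : Nat) : Int) := by omega
  rw [hk]
  rw [PySem.Int.mod_natCast k pvPalette.length, PySem.List.pyGet?_natCast]
  have hklt : k % pvPalette.length < pvPalette.length := Nat.mod_lt _ (by decide)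
  simp [List.getElem?_eq_getElem hklt, List.getD_eq_getElem?_getD]
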